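-- pv_equiv track=rewrite | github.com/IvonLuiz/Dynamic-Programing-Algorithms | contests_in_sequence/main.py | check_denis_function
-- ===== SOURCE A (Python) =====
-- import itertools
--
-- def check_denis_function(N, M, coefficients):
--     # Generate all possible unique tuples (rankings)
--     ranks = list(itertools.permutations(range(1, M + 1), N))
--
--     function_values = set()
--
--     for rank in ranks:
--         func_value = sum(coefficients[i] * rank[i] for i in range(N))
--
--         if func_value in function_values:
--             return "Try again later, Denis..."
--
--         function_values.add(func_value)
--
--     return "Lucky Denis!"
-- ===== SOURCE B (Python) =====
-- def check_denis_function(N, M, coefficients):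
--     # Generate the weighted sums directly by recursive backtracking (incremental
--     # partial sums, no itertools, no per-tuple re-summation), then detect a
--     # duplicate by sorting and scanning adjacent pairs (no hash set).
--     sums = []
--
--     def extend(i, avail, acc):
--         if i == N:
--             sums.append(acc)
--             return
--         if N - i > len(avail):  # prune: not enough values left to finish
--             return
--         ci = coefficients[i]
--         if i + 1 == N:  # last position: emit this branch's sums directly
--             sums.extend(acc + ci * v for v in avail)
--             return
--         for k in range(len(avail)):
--             extend(i + 1, avail[:k] + avail[k + 1:], acc + ci * avail[k])
--
--     extend(0, list(range(1, M + 1)), 0)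
--     sums.sort()
--     if any(x == y for x, y in zip(sums, sums[1:])):
--         return "Try again later, Denis..."
--     return "Lucky Denis!"
-- ===== Notes on version B (the rewrite author's own statement) =====
-- stated objective: alternative
-- what changed: Replaced A's itertools.permutations enumeration + per-tuple summation + incremental seen-set with early exit by recursive backtracking that builds each weighted sum incrementally along the partial permutation, followed by sort-and-adjacent-scan duplicate detection (no set at all).
import Mathlib
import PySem

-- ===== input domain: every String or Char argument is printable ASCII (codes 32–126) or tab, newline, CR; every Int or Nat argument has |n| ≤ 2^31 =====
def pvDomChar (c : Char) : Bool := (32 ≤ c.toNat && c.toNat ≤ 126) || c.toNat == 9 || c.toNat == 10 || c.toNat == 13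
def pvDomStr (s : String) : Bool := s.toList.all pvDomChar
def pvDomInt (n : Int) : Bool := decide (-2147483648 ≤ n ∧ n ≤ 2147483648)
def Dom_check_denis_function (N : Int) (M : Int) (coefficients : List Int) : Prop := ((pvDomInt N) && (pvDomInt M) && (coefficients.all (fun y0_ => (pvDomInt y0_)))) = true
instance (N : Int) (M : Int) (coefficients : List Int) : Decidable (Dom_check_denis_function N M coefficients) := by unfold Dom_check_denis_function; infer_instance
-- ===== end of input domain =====

-- B generates the weighted sums by recursive backtracking with incremental partial sums
-- and detects a duplicate by sort-and-adjacent-scan instead of A's seen-set loop; same cost.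

-- ===== PORT A =====
-- sum(coefficients[i] * rank[i] for i in range(N)); exact under Pre_ (rank indices in range there)
def pvFuncValue (coefficients rank : List Int) (N : Int) : Int :=
  (PySem.List.pyRange 0 N 1).foldl
    (fun acc i => acc + PySem.List.pyGetD coefficients i 0 * PySem.List.pyGetD rank i 0) 0

-- A's loop: incremental seen-set with early return
def pvLoopA (coefficients : List Int) (N : Int) (seen : PySem.Set Int) : List (List Int) → String
  | [] => "Lucky Denis!"
  | rank :: rest =>
    let v := pvFuncValue coefficients rank N
    if PySem.Set.contains seen v then "Try again later, Denis..."
    else pvLoopA coefficients N (PySem.Set.add seen v) rest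

def check_denis_function (N : Int) (M : Int) (coefficients : List Int) : String :=
  pvLoopA coefficients N PySem.Set.empty
    (PySem.List.permutations (PySem.List.pyRange 1 (M + 1) 1) N.toNat)

-- ===== PORT B =====
-- extend(i, avail, acc): recursive backtracking, r = N - i is the remaining depth;
-- the prune 'if N - i > len(avail): return' is the guard 'avail.length < r + 1';
-- 'if i + 1 == N: sums.extend(acc + ci * v for v in avail)' is the r = 0 inner case
def pvExtend (coefficients : List Int) : Nat → Nat → List Int → Int → List Int
  | _, 0, _, acc => [acc]
  | i, 1, avail, acc =>
    if avail.length < 1 then []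
    else avail.map (fun v => acc + PySem.List.pyGetD coefficients (i : Int) 0 * v)
  | i, r + 2, avail, acc =>
    if avail.length < r + 2 then []
    else (List.range avail.length).flatMap (fun k =>
      pvExtend coefficients (i + 1) (r + 1)
        (avail.take k ++ avail.drop (k + 1))
        (acc + PySem.List.pyGetD coefficients (i : Int) 0 * PySem.List.pyGetD avail (k : Int) 0))

def check_denis_function_alt (N : Int) (M : Int) (coefficients : List Int) : String :=
  let sums := pvExtend coefficients 0 N.toNat (PySem.List.pyRange 1 (M + 1) 1) 0
  let ss := PySem.List.sorted sums (fun x => x) false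
  if (ss.zip ss.tail).any (fun p => p.1 == p.2) then "Try again later, Denis..."
  else "Lucky Denis!"

-- ===== PRECONDITION & SPEC =====
-- Pre_ excludes exactly the inputs where the Python A raises: N < 0 (ValueError from
-- itertools.permutations) and 0 < N ≤ M with fewer than N coefficients (IndexError).
def Pre_check_denis_function (N : Int) (M : Int) (coefficients : List Int) : Prop :=
  0 ≤ N ∧ (N ≤ M → N ≤ (coefficients.length : Int))
instance (N : Int) (M : Int) (coefficients : List Int) : Decidable (Pre_check_denis_function N M coefficients) := by unfold Pre_check_denis_function; infer_instance

def pvWitness_check_denis_function : Int × Int × List Int := (2, 3, [1, 2])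

def Spec_check_denis_function (N : Int) (M : Int) (coefficients : List Int) (out : String) : Prop := out = check_denis_function_alt N M coefficients
instance (N : Int) (M : Int) (coefficients : List Int) (out : String) : Decidable (Spec_check_denis_function N M coefficients out) := by unfold Spec_check_denis_function; infer_instance

-- ===== CLAIM (what is proved, stated in full; the proofs are below) =====
def Claim_equal_check_denis_function : Prop := ∀ (N : Int) (M : Int) (coefficients : List Int), Dom_check_denis_function N M coefficients → Pre_check_denis_function N M coefficients → Spec_check_denis_function N M coefficients (check_denis_function N M coefficients)

-- ===== LEMMAS AND PROOFS =====

-- the weighted sum of a tuple, coefficients indexed from i (matches B's incremental accumulation)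
def pvWSum (coefficients : List Int) : Nat → List Int → Int
  | _, [] => 0
  | i, v :: t => PySem.List.pyGetD coefficients (i : Int) 0 * v + pvWSum coefficients (i + 1) t

theorem pv_pyGetD_cons_succ (x : Int) (xs : List Int) (k : Nat) (d : Int) :
    PySem.List.pyGetD (x :: xs) ((k : Int) + 1) d = PySem.List.pyGetD xs (k : Int) d := by
  have h : ((k : Int) + 1) = ((k + 1 : Nat) : Int) := by push_cast; ring
  rw [h, PySem.List.pyGetD_natCast, PySem.List.pyGetD_natCast]
  simp

-- every member of permutations xs r has length r
theorem pv_length_of_mem_permutations :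
    ∀ (r : Nat) (xs p : List Int), p ∈ PySem.List.permutations xs r → p.length = r := by
  intro r
  induction r with
  | zero => intro xs p hp; simp [PySem.List.permutations] at hp; simp [hp]
  | succ r ih =>
    intro xs p hp
    simp only [PySem.List.permutations, List.mem_flatMap, List.mem_range] at hp
    obtain ⟨k, hk, hp⟩ := hp
    rcases h : xs[k]? with _ | x
    · rw [h] at hp; simp at hp
    · rw [h] at hp
      simp only [List.mem_map] at hp
      obtain ⟨q, hq, rfl⟩ := hp
      simp [ih _ _ hq]

-- permutations of xs of a length exceeding xs are none at all
theorem pv_permutations_eq_nil :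
    ∀ (r : Nat) (xs : List Int), xs.length < r → PySem.List.permutations xs r = [] := by
  intro r
  induction r with
  | zero => intro xs h; omega
  | succ r ih =>
    intro xs h
    simp only [PySem.List.permutations]
    rw [List.flatMap_eq_nil_iff]
    intro k hk
    rw [List.mem_range] at hk
    rw [List.getElem?_eq_getElem hk]
    have : (xs.eraseIdx k).length < r := by
      rw [List.length_eraseIdx_of_lt hk]; omega
    rw [ih _ this]
    simp

-- generic (non-unrolled) form of B's backtracking, for the proofs only
def pvExtendGen (coefficients : List Int) : Nat → Nat → List Int → Int → List Int
  | _, 0, _, acc => [acc]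
  | i, r + 1, avail, acc =>
    if avail.length < r + 1 then []
    else (List.range avail.length).flatMap (fun k =>
      pvExtendGen coefficients (i + 1) r
        (avail.take k ++ avail.drop (k + 1))
        (acc + PySem.List.pyGetD coefficients (i : Int) 0 * PySem.List.pyGetD avail (k : Int) 0))

-- a map over a list is the flatMap of singletons over its index range
theorem pv_map_eq_flatMap_range :
    ∀ (xs : List Int) (g : Int → Int),
      xs.map g = (List.range xs.length).flatMap
        (fun (k : Nat) => [g (PySem.List.pyGetD xs (k : Int) 0)]) := by
  intro xs
  induction xs with
  | nil => intro g; rfl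
  | cons x t ih =>
    intro g
    rw [List.length_cons, List.range_succ_eq_map, List.flatMap_cons, List.flatMap_map]
    have hfun : (fun (k : Nat) => [g (PySem.List.pyGetD (x :: t) ((k.succ : Nat) : Int) 0)])
        = fun (k : Nat) => [g (PySem.List.pyGetD t (k : Int) 0)] := by
      funext k
      have h2 : (((k.succ : Nat)) : Int) = (k : Int) + 1 := by push_cast; ring
      rw [h2, pv_pyGetD_cons_succ]
    rw [hfun, ← ih]
    rw [List.map_cons]
    simp

-- B's unrolled last level agrees with the generic recursion
theorem pv_extend_eq_gen :
    ∀ (r : Nat) (coefficients avail : List Int) (i : Nat) (acc : Int),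
      pvExtend coefficients i r avail acc = pvExtendGen coefficients i r avail acc := by
  intro r
  induction r with
  | zero => intro c avail i acc; rfl
  | succ r ih =>
    intro c avail i acc
    match r with
    | 0 =>
      rw [pvExtend, pvExtendGen]
      by_cases hlen : avail.length < 0 + 1
      · rw [if_pos hlen, if_pos hlen]
      · rw [if_neg hlen, if_neg hlen]
        rw [pv_map_eq_flatMap_range]
        apply List.flatMap_congr
        intro k _
        rfl
    | r' + 1 =>
      rw [pvExtend, pvExtendGen]
      by_cases hlen : avail.length < r' + 1 + 1
      · rw [if_pos hlen, if_pos hlen]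
      · rw [if_neg hlen, if_neg hlen]
        apply List.flatMap_congr
        intro k _
        rw [ih]

-- B's generator is A's permutations list mapped through the weighted sum
theorem pv_extend_eq_map :
    ∀ (r : Nat) (coefficients avail : List Int) (i : Nat) (acc : Int),
      pvExtendGen coefficients i r avail acc =
        (PySem.List.permutations avail r).map (fun t => acc + pvWSum coefficients i t) := by
  intro r
  induction r with
  | zero => intro c avail i acc; simp [pvExtendGen, PySem.List.permutations, pvWSum]
  | succ r ih =>
    intro c avail i acc
    by_cases hlen : avail.length < r + 1
    · rw [pvExtendGen, if_pos hlen, pv_permutations_eq_nil _ _ hlen]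
      simp
    · rw [pvExtendGen, if_neg hlen]
      simp only [PySem.List.permutations, List.map_flatMap]
      apply List.flatMap_congr
      intro k hk
      rw [List.mem_range] at hk
      rw [List.getElem?_eq_getElem hk]
      have he : avail.take k ++ avail.drop (k + 1) = avail.eraseIdx k :=
        (List.eraseIdx_eq_take_drop_succ avail k).symm
      have hv : PySem.List.pyGetD avail (k : Int) 0 = avail[k] :=
        PySem.List.pyGetD_ofNat avail k 0 hk
      rw [he, hv, ih]
      simp only [List.map_map]
      apply List.map_congr_left
      intro t _
      simp only [Function.comp, pvWSum]
      rw [add_assoc]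

-- A's per-tuple summation equals the incremental weighted sum
theorem pv_funcValue_eq_wsum_aux :
    ∀ (rank c : List Int) (i : Nat) (init : Int),
      (List.range rank.length).foldl
        (fun (acc : Int) (k : Nat) => acc + PySem.List.pyGetD c ((i : Int) + (k : Int)) 0 * PySem.List.pyGetD rank ((k : Int)) 0) init
      = init + pvWSum c i rank := by
  intro rank
  induction rank with
  | nil => intro c i init; simp [pvWSum]
  | cons v t ih =>
    intro c i init
    rw [List.length_cons, List.range_succ_eq_map, List.foldl_cons, List.foldl_map]
    have h0 : PySem.List.pyGetD (v :: t) ((0 : Nat) : Int) 0 = v := by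
      simp
    have hfun :
        (fun (acc : Int) (k : Nat) => acc + PySem.List.pyGetD c ((i : Int) + ((k.succ : Nat) : Int)) 0 *
            PySem.List.pyGetD (v :: t) ((k.succ : Nat) : Int) 0)
        = fun (acc : Int) (k : Nat) => acc + PySem.List.pyGetD c (((i + 1 : Nat) : Int) + (k : Int)) 0 *
            PySem.List.pyGetD t (k : Int) 0 := by
      funext acc k
      have h1 : ((i : Int) + ((k.succ : Nat) : Int)) = (((i + 1 : Nat) : Int) + (k : Int)) := by
        push_cast; ring
      have h2 : (((k.succ : Nat)) : Int) = (k : Int) + 1 := by push_cast; ring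
      rw [h1, h2, pv_pyGetD_cons_succ]
    rw [hfun, ih]
    simp only [pvWSum, h0]
    push_cast
    ring_nf

theorem pv_funcValue_eq_wsum (c rank : List Int) :
    pvFuncValue c rank (rank.length : Int) = pvWSum c 0 rank := by
  unfold pvFuncValue
  rw [PySem.List.pyRange_one]
  have h1 : (((rank.length : Int)) - 0).toNat = rank.length := by omega
  rw [h1, List.foldl_map]
  have hfun : (fun (acc : Int) (k : Nat) => acc + PySem.List.pyGetD c (0 + (k : Int)) 0 *
        PySem.List.pyGetD rank (0 + (k : Int)) 0)
      = fun (acc : Int) (k : Nat) => acc + PySem.List.pyGetD c (((0 : Nat) : Int) + (k : Int)) 0 *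
        PySem.List.pyGetD rank ((k : Int)) 0 := by
    funext acc k
    norm_num
  rw [hfun]
  simpa using pv_funcValue_eq_wsum_aux rank c 0 0

-- the loop returns one of the two strings
theorem pv_loopA_cases (c : List Int) (N : Int) :
    ∀ (l : List (List Int)) (seen : PySem.Set Int),
      pvLoopA c N seen l = "Lucky Denis!" ∨ pvLoopA c N seen l = "Try again later, Denis..." := by
  intro l
  induction l with
  | nil => intro seen; left; rfl
  | cons r rest ih =>
    intro seen
    simp only [pvLoopA]
    split
    · right; rfl
    · exact ih _

-- characterisation of A's loop
theorem pv_loopA_lucky (c : List Int) (N : Int) :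
    ∀ (l : List (List Int)) (seen : PySem.Set Int),
      (pvLoopA c N seen l = "Lucky Denis!") ↔
        ((l.map (fun r => pvFuncValue c r N)).Nodup ∧
         ∀ v ∈ l.map (fun r => pvFuncValue c r N), v ∉ seen) := by
  intro l
  induction l with
  | nil => intro seen; simp [pvLoopA]
  | cons r rest ih =>
    intro seen
    simp only [pvLoopA, List.map_cons]
    by_cases hv : PySem.Set.contains seen (pvFuncValue c r N) = true
    · have hmem := (PySem.Set.contains_iff _ _).1 hv
      simp only [hv, if_pos]
      constructor
      · intro h; exact absurd h (by decide)
      · rintro ⟨-, hall⟩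
        exact absurd hmem (hall _ (List.mem_cons_self))
    · have hmem : pvFuncValue c r N ∉ seen := fun h => hv ((PySem.Set.contains_iff _ _).2 h)
      simp only [hv, if_neg, Bool.not_eq_true]
      rw [ih]
      constructor
      · rintro ⟨hnd, hall⟩
        have hall' : ∀ v ∈ rest.map (fun r => pvFuncValue c r N), v ∉ seen ∧ v ≠ pvFuncValue c r N := by
          intro v hvmem
          have := hall v hvmem
          rw [PySem.Set.mem_add] at this
          push Not at this
          exact this
        refine ⟨List.nodup_cons.2 ⟨?_, hnd⟩, ?_⟩
        · intro hcon; exact (hall' _ hcon).2 rfl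
        · intro v hvmem
          rcases List.mem_cons.1 hvmem with h | h
          · subst h; exact hmem
          · exact (hall' _ h).1
      · rintro ⟨hnd, hall⟩
        have hne := (List.nodup_cons.1 hnd).1
        refine ⟨(List.nodup_cons.1 hnd).2, ?_⟩
        intro v hvmem
        rw [PySem.Set.mem_add]
        push Not
        exact ⟨hall v (List.mem_cons_of_mem _ hvmem),
               fun he => hne (he ▸ hvmem)⟩

-- for a weakly increasing list, no adjacent equality ↔ no duplicates at all
theorem pv_adj_nodup :
    ∀ (ss : List Int), ss.Pairwise (· ≤ ·) →
      (((ss.zip ss.tail).any (fun p => p.1 == p.2)) = false ↔ ss.Nodup) := by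
  intro ss
  induction ss with
  | nil => intro _; simp
  | cons a t ih =>
    intro hp
    have hale : ∀ x ∈ t, a ≤ x := fun x hx => (List.pairwise_cons.1 hp).1 x hx
    have hpt : t.Pairwise (· ≤ ·) := (List.pairwise_cons.1 hp).2
    cases t with
    | nil => simp
    | cons b t' =>
      have hble : ∀ x ∈ t', b ≤ x := fun x hx => (List.pairwise_cons.1 hpt).1 x hx
      simp only [List.tail_cons] at ih ⊢
      simp only [List.zip_cons_cons, List.any_cons, Bool.or_eq_false_iff]
      rw [ih hpt]
      constructor
      · rintro ⟨hab, hnd⟩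
        have hab' : a ≠ b := by simpa using hab
        refine List.nodup_cons.2 ⟨?_, hnd⟩
        intro hmem
        rcases List.mem_cons.1 hmem with h | h
        · exact hab' h
        · have h1 : a ≤ b := hale b (List.mem_cons_self)
          have h2 : b ≤ a := hble a h
          exact hab' (le_antisymm h1 h2)
      · intro hnd
        have h1 := (List.nodup_cons.1 hnd).1
        refine ⟨?_, (List.nodup_cons.1 hnd).2⟩
        simp only [beq_eq_false_iff_ne, ne_eq]
        intro h; exact h1 (h ▸ List.mem_cons_self)

-- ===== VERDICT (by name: the statement is the Claim_ definition above) =====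
theorem check_denis_function_spec : Claim_equal_check_denis_function := by
  intro N M coefficients _ hpre
  obtain ⟨hN, -⟩ := hpre
  simp only [Spec_check_denis_function, check_denis_function, check_denis_function_alt]
  set perms := PySem.List.permutations (PySem.List.pyRange 1 (M + 1) 1) N.toNat with hperms
  have hsums : pvExtend coefficients 0 N.toNat (PySem.List.pyRange 1 (M + 1) 1) 0
      = perms.map (fun t => pvWSum coefficients 0 t) := by
    rw [pv_extend_eq_gen, pv_extend_eq_map, hperms]
    exact List.map_congr_left (fun t _ => zero_add _)
  have hmapeq : perms.map (fun r => pvFuncValue coefficients r N)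
      = perms.map (fun t => pvWSum coefficients 0 t) := by
    apply List.map_congr_left
    intro t ht
    have hlen : t.length = N.toNat := pv_length_of_mem_permutations _ _ _ ht
    have hcast : (t.length : Int) = N := by rw [hlen]; omega
    rw [← hcast, pv_funcValue_eq_wsum]
  set sums := perms.map (fun t => pvWSum coefficients 0 t) with hs
  set ss := PySem.List.sorted sums (fun x => x) false with hss
  have hperm : ss.Perm sums := PySem.List.sorted_perm sums (fun x => x) false
  have hpw : ss.Pairwise (· ≤ ·) := by
    have := PySem.List.sorted_pairwise (xs := sums) (key := fun x => x)
    simpa using this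
  have hadj := pv_adj_nodup ss hpw
  simp only [hsums]
  rw [← hss]
  by_cases hnd : sums.Nodup
  · have hB : ((ss.zip ss.tail).any (fun p => p.1 == p.2)) = false :=
      hadj.2 (hperm.nodup_iff.2 hnd)
    simp only [hB, Bool.false_eq_true, if_false]
    rw [pv_loopA_lucky, hmapeq]
    exact ⟨hnd, by simp [PySem.Set.empty]⟩
  · have hB : ¬ ((ss.zip ss.tail).any (fun p => p.1 == p.2)) = false := by
      intro h; exact hnd (hperm.nodup_iff.1 (hadj.1 h))
    rw [Bool.not_eq_false] at hB
    simp only [hB, if_true]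
    rcases pv_loopA_cases coefficients N perms PySem.Set.empty with h | h
    · exfalso
      have := (pv_loopA_lucky coefficients N perms PySem.Set.empty).1 h
      rw [hmapeq] at this
      exact hnd this.1
    · exact h
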